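-- pv_equiv track=rewrite | github.com/jpwahle/cs-insights-crawler | nlpland/main.py | determine_earliest_string
-- ===== SOURCE A (Python) =====
-- from typing import List
--
-- def determine_earliest_string(text: str, possible_strings: List[str]):
--     earliest_string = ""
--     earliest_pos = -1
--     for possible_string in possible_strings:
--         pos_current = text.find(possible_string)
--         if pos_current != -1 and (earliest_pos == -1 or pos_current < earliest_pos):
--             earliest_pos = pos_current
--             earliest_string = possible_string
--     return earliest_pos, earliest_string
-- ===== SOURCE B (Python) =====
-- from typing import List
--
-- def determine_earliest_string(text: str, possible_strings: List[str]):
--     # Scan text positions left to right; at the first position where some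
--     # candidate starts, return it (first candidate in list order wins).
--     for i in range(len(text) + 1):
--         for s in possible_strings:
--             if text.startswith(s, i):
--                 return i, s
--     return -1, ""
-- ===== Notes on version B (the rewrite author's own statement) =====
-- stated objective: faster
-- what changed: Replaced A's candidate-driven search (a complete text.find scan per candidate plus a running minimum with sentinel -1) by a text-driven scan: walk positions 0..len(text) left to right and return at the first position where any candidate starts via startswith (first candidate in list order wins), never calling find.
import Mathlib
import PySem

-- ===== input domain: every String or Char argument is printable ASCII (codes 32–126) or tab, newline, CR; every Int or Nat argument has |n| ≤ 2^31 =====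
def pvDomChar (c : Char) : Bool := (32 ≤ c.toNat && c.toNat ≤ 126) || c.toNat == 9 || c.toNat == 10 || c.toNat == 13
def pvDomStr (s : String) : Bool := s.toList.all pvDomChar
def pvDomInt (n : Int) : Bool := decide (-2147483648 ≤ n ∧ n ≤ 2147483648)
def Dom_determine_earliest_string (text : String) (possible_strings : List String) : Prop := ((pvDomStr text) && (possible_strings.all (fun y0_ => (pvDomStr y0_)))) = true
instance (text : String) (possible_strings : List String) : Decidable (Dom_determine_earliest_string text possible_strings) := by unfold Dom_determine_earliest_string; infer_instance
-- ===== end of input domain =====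

-- B replaces A's candidate-driven find-with-running-minimum by a text-driven scan of the
-- positions 0..len(text), returning at the first position where any candidate starts.

-- ===== PORT A =====
def determine_earliest_string (text : String) (possible_strings : List String) : Int × String :=
  possible_strings.foldl
    (fun st possible_string =>
      let pos_current := PySem.Str.find text possible_string
      if pos_current ≠ -1 ∧ (st.1 = -1 ∨ pos_current < st.1) then (pos_current, possible_string)
      else st)
    (-1, "")

-- ===== PORT B =====
-- inner loop 'for s in possible_strings: if text.startswith(s, i): return i, s'.
-- text.startswith(s, i) for 0 ≤ i ≤ len(text) is exactly: s is a prefix of text[i:].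
def pvInner (textL : List Char) (i : Nat) : List String → Option (Int × String)
  | [] => none
  | s :: rest =>
      if s.toList.isPrefixOf (textL.drop i) then some ((i : Int), s)
      else pvInner textL i rest

-- outer loop 'for i in range(len(text) + 1): …', early return modelled by Option
def pvOuter (textL : List Char) (cands : List String) : List Nat → Int × String
  | [] => (-1, "")
  | i :: rest =>
      match pvInner textL i cands with
      | some r => r
      | none => pvOuter textL cands rest

def determine_earliest_string_alt (text : String) (possible_strings : List String) : Int × String :=
  pvOuter text.toList possible_strings (List.range (text.toList.length + 1))

-- ===== PRECONDITION & SPEC =====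
def Spec_determine_earliest_string (text : String) (possible_strings : List String) (out : Int × String) : Prop := out = determine_earliest_string_alt text possible_strings
instance (text : String) (possible_strings : List String) (out : Int × String) : Decidable (Spec_determine_earliest_string text possible_strings out) := by unfold Spec_determine_earliest_string; infer_instance

-- ===== CLAIM (what is proved, stated in full; the proofs are below) =====
def Claim_equal_determine_earliest_string : Prop := ∀ (text : String) (possible_strings : List String), Dom_determine_earliest_string text possible_strings → Spec_determine_earliest_string text possible_strings (determine_earliest_string text possible_strings)

-- ===== LEMMAS AND PROOFS =====

-- abbreviation used throughout the proofs: A's per-candidate find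
def pvF (textL : List Char) (s : String) : Int := PySem.Chars.find textL s.toList

-- A's loop body as a named step function
def pvStepA (textL : List Char) (st : Int × String) (s : String) : Int × String :=
  if pvF textL s ≠ -1 ∧ (st.1 = -1 ∨ pvF textL s < st.1) then (pvF textL s, s) else st

lemma pvFoldA_keep (textL : List Char) (l : List String) (a : Int × String)
    (h : ∀ s ∈ l, pvF textL s = -1 ∨ (a.1 ≠ -1 ∧ a.1 ≤ pvF textL s)) :
    l.foldl (pvStepA textL) a = a := by
  induction l with
  | nil => rfl
  | cons s t ih =>
    have hs := h s (by simp)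
    have hstep : pvStepA textL a s = a := by
      unfold pvStepA
      rcases hs with h1 | h2
      · simp [h1]
      · have : ¬(pvF textL s ≠ -1 ∧ (a.1 = -1 ∨ pvF textL s < a.1)) := by
          rintro ⟨-, h3 | h4⟩
          · exact h2.1 h3
          · omega
        simp [this]
    simp only [List.foldl_cons, hstep]
    exact ih (fun s hs => h s (by simp [hs]))

lemma pvFoldA_reach (textL : List Char) (pre suf : List String) (s₀ : String) (a : Int × String)
    (hs₀ : pvF textL s₀ ≠ -1)
    (ha : a.1 = -1 ∨ pvF textL s₀ < a.1)
    (hpre : ∀ s ∈ pre, pvF textL s = -1 ∨ pvF textL s₀ < pvF textL s)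
    (hsuf : ∀ s ∈ suf, pvF textL s = -1 ∨ pvF textL s₀ ≤ pvF textL s) :
    (pre ++ s₀ :: suf).foldl (pvStepA textL) a = (pvF textL s₀, s₀) := by
  induction pre generalizing a with
  | nil =>
    simp only [List.nil_append, List.foldl_cons]
    have hstep : pvStepA textL a s₀ = (pvF textL s₀, s₀) := by
      unfold pvStepA; simp [hs₀, ha]
    rw [hstep]
    exact pvFoldA_keep textL suf _ (by
      intro s hs
      rcases hsuf s hs with h1 | h2
      · exact Or.inl h1
      · exact Or.inr ⟨hs₀, h2⟩)
  | cons p t ih =>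
    simp only [List.cons_append, List.foldl_cons]
    have hp := hpre p (by simp)
    have ha' : (pvStepA textL a p).1 = -1 ∨ pvF textL s₀ < (pvStepA textL a p).1 := by
      unfold pvStepA
      split
      · rename_i hcond
        rcases hp with h1 | h2
        · exact absurd h1 hcond.1
        · exact Or.inr h2
      · exact ha
    exact ih _ ha' (fun s hs => hpre s (by simp [hs]))

-- B's inner loop: none means no candidate starts at i
lemma pvInner_eq_none_iff (textL : List Char) (i : Nat) (l : List String) :
    pvInner textL i l = none ↔ ∀ s ∈ l, ¬ s.toList <+: textL.drop i := by
  induction l with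
  | nil => simp [pvInner]
  | cons s t ih =>
    by_cases h : s.toList.isPrefixOf (textL.drop i)
    · simp [pvInner, h, List.isPrefixOf_iff_prefix.mp h]
    · simp only [pvInner, if_neg h, ih]
      constructor
      · intro hall u hu
        rcases List.mem_cons.mp hu with rfl | hu'
        · exact fun hc => h (List.isPrefixOf_iff_prefix.mpr hc)
        · exact hall u hu'
      · intro hall u hu; exact hall u (List.mem_cons_of_mem _ hu)

-- B's inner loop: a hit is position i and the FIRST candidate starting at i
lemma pvInner_some (textL : List Char) (i : Nat) (l : List String) (r : Int × String)
    (h : pvInner textL i l = some r) :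
    r.1 = (i : Int) ∧ ∃ pre suf, l = pre ++ r.2 :: suf ∧
      (∀ s ∈ pre, ¬ s.toList <+: textL.drop i) ∧ r.2.toList <+: textL.drop i := by
  induction l with
  | nil => simp [pvInner] at h
  | cons s t ih =>
    by_cases hp : s.toList.isPrefixOf (textL.drop i)
    · simp only [pvInner, if_pos hp] at h
      cases h
      exact ⟨rfl, [], t, rfl, by simp, List.isPrefixOf_iff_prefix.mp hp⟩
    · simp only [pvInner, if_neg hp] at h
      obtain ⟨h1, pre, suf, rfl, h2, h3⟩ := ih h
      exact ⟨h1, s :: pre, suf, rfl, by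
        intro u hu
        rcases List.mem_cons.mp hu with rfl | hu'
        · exact fun hc => hp (List.isPrefixOf_iff_prefix.mpr hc)
        · exact h2 u hu', h3⟩

-- B's outer loop skips positions where the inner loop finds nothing
lemma pvOuter_skip (textL : List Char) (cands : List String) (xs ys : List Nat)
    (h : ∀ i ∈ xs, pvInner textL i cands = none) :
    pvOuter textL cands (xs ++ ys) = pvOuter textL cands ys := by
  induction xs with
  | nil => rfl
  | cons i t ih =>
    simp only [List.cons_append, pvOuter, h i (by simp)]
    exact ih (fun j hj => h j (by simp [hj]))

lemma pvOuter_none (textL : List Char) (cands : List String) (xs : List Nat)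
    (h : ∀ i ∈ xs, pvInner textL i cands = none) :
    pvOuter textL cands xs = (-1, "") := by
  have := pvOuter_skip textL cands xs [] h
  simpa using this

-- a candidate starting at position i occurs in the text
lemma pv_prefix_drop_infix {sub textL : List Char} {i : Nat}
    (h : sub <+: textL.drop i) : sub <:+: textL :=
  h.isInfix.trans (textL.drop_suffix i).isInfix

-- find of a candidate relates to the positions where it starts
lemma pvF_eq_of_prefix (textL : List Char) (s : String) (i : Nat)
    (h : s.toList <+: textL.drop i)
    (hmin : ∀ j < i, ¬ ∃ u ∈ [s], u.toList <+: textL.drop j) :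
    pvF textL s = (i : Int) := by
  unfold pvF
  have hinf : s.toList <:+: textL := pv_prefix_drop_infix h
  have hnn : 0 ≤ PySem.Chars.find textL s.toList := (PySem.Chars.find_nonneg_iff _ _).mpr hinf
  obtain ⟨hpref, hfirst⟩ := PySem.Chars.find_spec hnn
  -- find.toNat ≤ i since find is the first occurrence and s starts at i
  have hle : (PySem.Chars.find textL s.toList).toNat ≤ i := by
    by_contra hgt
    exact hfirst i (by omega) h
  -- i ≤ find.toNat since no position before i carries s
  have hge : i ≤ (PySem.Chars.find textL s.toList).toNat := by
    by_contra hgt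
    exact hmin _ (by omega) ⟨s, by simp, hpref⟩
  omega

-- ===== MAIN PROOF =====
theorem pv_main (text : String) (possible_strings : List String) :
    determine_earliest_string text possible_strings
      = determine_earliest_string_alt text possible_strings := by
  set textL := text.toList with htextL
  have hA : determine_earliest_string text possible_strings
      = possible_strings.foldl (pvStepA textL) (-1, "") := by
    unfold determine_earliest_string pvStepA pvF
    simp [PySem.Str.find_eq, htextL]
  by_cases hex : ∃ i, ∃ s ∈ possible_strings, s.toList <+: textL.drop i
  · -- some candidate occurs: both return (m, first candidate starting at m)
    classical
    let m := Nat.find hex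
    have hPm : ∃ s ∈ possible_strings, s.toList <+: textL.drop m := Nat.find_spec hex
    have hmle : m ≤ textL.length := by
      by_contra hgt
      push Not at hgt
      obtain ⟨s, hs, hpref⟩ := hPm
      have hdrop : textL.drop m = [] := List.drop_eq_nil_of_le (by omega)
      have hnil : s.toList = [] := by
        rw [hdrop] at hpref; exact List.prefix_nil.mp hpref
      have h0 : ∃ s ∈ possible_strings, s.toList <+: textL.drop 0 := ⟨s, hs, by simp [hnil]⟩
      have := Nat.find_min' hex h0
      omega
    -- B's value
    have hinner : pvInner textL m possible_strings ≠ none := by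
      intro hnone
      rw [pvInner_eq_none_iff] at hnone
      obtain ⟨s, hs, hpref⟩ := hPm
      exact hnone s hs hpref
    obtain ⟨r, hr⟩ := Option.ne_none_iff_exists'.mp hinner
    obtain ⟨hr1, pre, suf, hdecomp, hpre, hs₀⟩ := pvInner_some textL m possible_strings r hr
    have hB : determine_earliest_string_alt text possible_strings = r := by
      unfold determine_earliest_string_alt
      rw [← htextL, List.range_eq_range']
      have hsplit : List.range' 0 (textL.length + 1)
          = List.range' 0 m ++ List.range' m (textL.length + 1 - m) := by
        have h2 : List.range' 0 m ++ List.range' (0 + m) (textL.length + 1 - m)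
            = List.range' 0 (m + (textL.length + 1 - m)) := List.range'_append_1
        rw [Nat.zero_add] at h2
        rw [show m + (textL.length + 1 - m) = textL.length + 1 from by omega] at h2
        exact h2.symm
      rw [hsplit, pvOuter_skip]
      · obtain ⟨k, hk⟩ : ∃ k, textL.length + 1 - m = k + 1 := ⟨textL.length - m, by omega⟩
        rw [hk, List.range'_succ]
        simp [pvOuter, hr]
      · intro i hi
        have him : i < m := by
          have := List.mem_range'_1.mp hi
          omega
        rw [pvInner_eq_none_iff]
        intro s hs hc
        exact Nat.find_min hex him ⟨s, hs, hc⟩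
    -- A's value
    have hfmin : ∀ j < m, ¬ ∃ u ∈ possible_strings, u.toList <+: textL.drop j :=
      fun j hj => Nat.find_min hex hj
    have hfr : pvF textL r.2 = (m : Int) := by
      apply pvF_eq_of_prefix textL r.2 m hs₀
      intro j hj hc
      obtain ⟨u, hu, hcp⟩ := hc
      simp only [List.mem_singleton] at hu
      subst hu
      refine hfmin j hj ⟨r.2, ?_, hcp⟩
      rw [hdecomp]; simp
    have hfrne : pvF textL r.2 ≠ -1 := by rw [hfr]; omega
    have hother : ∀ s ∈ possible_strings,
        pvF textL s = -1 ∨ (m : Int) ≤ pvF textL s := by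
      intro s hs
      by_cases h1 : pvF textL s = -1
      · exact Or.inl h1
      · right
        unfold pvF at h1 ⊢
        have hnn : 0 ≤ PySem.Chars.find textL s.toList := by
          have := PySem.Chars.neg_one_le_find textL s.toList
          omega
        obtain ⟨hpref, -⟩ := PySem.Chars.find_spec hnn
        have hPf : ∃ u ∈ possible_strings,
            u.toList <+: textL.drop (PySem.Chars.find textL s.toList).toNat :=
          ⟨s, hs, hpref⟩
        have := Nat.find_min' hex hPf
        omega
    have hA' : possible_strings.foldl (pvStepA textL) (-1, "") = (pvF textL r.2, r.2) := by
      rw [hdecomp]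
      apply pvFoldA_reach textL pre suf r.2 (-1, "") hfrne (Or.inl rfl)
      · intro s hs
        rcases hother s (by rw [hdecomp]; simp [hs]) with h1 | h2
        · exact Or.inl h1
        · right
          have hne : pvF textL s ≠ (m : Int) := by
            unfold pvF
            intro hc
            have hnn : 0 ≤ PySem.Chars.find textL s.toList := by rw [hc]; omega
            obtain ⟨hpref, -⟩ := PySem.Chars.find_spec hnn
            apply hpre s hs
            have hto : (PySem.Chars.find textL s.toList).toNat = m := by omega
            rwa [hto] at hpref
          rw [hfr]; omega
      · intro s hs
        rcases hother s (by rw [hdecomp]; simp [hs]) with h1 | h2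
        · exact Or.inl h1
        · right; rw [hfr]; omega
    rw [hA, hA', hfr, hB]
    exact Prod.ext (by simp [hr1]) rfl
  · -- no candidate occurs anywhere: both return (-1, "")
    push Not at hex
    have hB : determine_earliest_string_alt text possible_strings = (-1, "") := by
      unfold determine_earliest_string_alt
      rw [← htextL]
      apply pvOuter_none
      intro i _
      rw [pvInner_eq_none_iff]
      intro s hs hc
      exact hex i s hs hc
    have hA' : possible_strings.foldl (pvStepA textL) (-1, "") = (-1, "") := by
      apply pvFoldA_keep
      intro s hs
      left
      unfold pvF
      rw [PySem.Chars.find_eq_neg_one_iff]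
      intro hinf
      obtain ⟨j, hj⟩ := (PySem.Chars.exists_prefix_drop_iff_isIn s.toList textL).2
        ((PySem.Chars.isIn_iff_infix _ _).mpr hinf)
      exact hex j s hs hj
    rw [hA, hA', hB]

-- ===== VERDICT (by name: the statement is the Claim_ definition above) =====
theorem determine_earliest_string_spec : Claim_equal_determine_earliest_string := by
  intro text possible_strings _
  unfold Spec_determine_earliest_string
  exact pv_main text possible_strings
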